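-- pv_equiv track=rewrite | github.com/pypi-data/pypi-mirror-397 | packages/deadline/deadline-0.54.0.tar.gz/deadline-0.54.0/src/deadline/common/path_utils.py | _int_set_to_range_expr
-- ===== SOURCE A (Python) =====
-- def _int_set_to_range_expr(int_set: set[int]) -> str:
--     """
--     Converts a set of integers into a range expression.
--     For example, {1,2,3,4,5,7,8,9,10} -> "1-5,7-10"
--     """
--     int_list = sorted(set(int_set))
--     range_expr_components = []
--     last_interval_start = last_interval_end = int_list[0]
--
--     def add_interval(start: int, end: int):
--         if start == last_interval_end:
--             range_expr_components.append(str(start))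
--         else:
--             range_expr_components.append(f"{start}-{end}")
--
--     for value in int_list[1:]:
--         if value == last_interval_end + 1:
--             last_interval_end = value
--         else:
--             add_interval(last_interval_start, last_interval_end)
--             last_interval_start = last_interval_end = value
--     add_interval(last_interval_start, last_interval_end)
--     return ",".join(range_expr_components)
-- ===== SOURCE B (Python) =====
-- def _int_set_to_range_expr(int_set):
--     """
--     Converts a set of integers into a range expression.
--     For example, {1,2,3,4,5,7,8,9,10} -> "1-5,7-10"
--     """
--     s = sorted(set(int_set))
--     vals = set(s)
--     starts = [v for v in s if v - 1 not in vals]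
--     ends = [v for v in s if v + 1 not in vals]
--     return ",".join(
--         str(a) if a == b else f"{a}-{b}" for a, b in zip(starts, ends)
--     )
-- ===== Notes on version B (the rewrite author's own statement) =====
-- stated objective: alternative
-- what changed: Replaces A's sequential start/end state machine with boundary detection by set membership: a value starts a run iff v-1 is absent from the set and ends one iff v+1 is absent; starts and ends are collected in two independent passes and zipped.
import Mathlib
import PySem

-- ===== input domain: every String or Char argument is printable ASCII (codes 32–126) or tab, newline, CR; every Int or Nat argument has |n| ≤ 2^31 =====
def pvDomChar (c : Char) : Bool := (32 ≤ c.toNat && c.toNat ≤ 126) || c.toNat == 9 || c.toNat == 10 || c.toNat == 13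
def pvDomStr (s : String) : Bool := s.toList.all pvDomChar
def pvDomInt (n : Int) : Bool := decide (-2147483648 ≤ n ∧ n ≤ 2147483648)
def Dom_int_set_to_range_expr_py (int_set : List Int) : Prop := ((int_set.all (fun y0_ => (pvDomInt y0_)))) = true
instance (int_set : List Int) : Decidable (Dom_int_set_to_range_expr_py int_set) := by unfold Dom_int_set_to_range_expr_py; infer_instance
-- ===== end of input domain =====

-- ===== PORT A =====
-- B replaces A's sequential start/end state machine by set-membership boundary detection
-- (v is a run start iff v-1 is not in the set, an end iff v+1 is not): alternative algorithm, same cost.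
-- A's add_interval compares `start == last_interval_end`; at both call sites last_interval_end equals the `end` argument, ported as s = e.
def aAddStr (s e : Int) : String :=
  if s = e then PySem.Int.toStr s else PySem.Int.toStr s ++ "-" ++ PySem.Int.toStr e

-- loop body of A's `for value in int_list[1:]`: state = (range_expr_components, last_interval_start, last_interval_end)
def aStep (st : List String × Int × Int) (v : Int) : List String × Int × Int :=
  if v = st.2.2 + 1 then (st.1, st.2.1, v)
  else (st.1 ++ [aAddStr st.2.1 st.2.2], v, v)

def int_set_to_range_expr_py (int_set : List Int) : String :=
  let int_list := PySem.List.sorted (PySem.Set.ofList int_set) (fun x => x) false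
  match int_list with
  | [] => ""  -- int_list[0] raises IndexError here; excluded by Pre_
  | x :: _ =>
    let st := (PySem.List.slice int_list (some 1) none).foldl aStep ([], x, x)
    PySem.Str.join "," (st.1 ++ [aAddStr st.2.1 st.2.2])

-- ===== PORT B =====
-- str(a) if a == b else f"{a}-{b}" for a pair (a, b) of zip(starts, ends)
def bRenderPair (p : Int × Int) : String :=
  if p.1 = p.2 then PySem.Int.toStr p.1 else PySem.Int.toStr p.1 ++ "-" ++ PySem.Int.toStr p.2

def int_set_to_range_expr_py_alt (int_set : List Int) : String :=
  let s := PySem.List.sorted (PySem.Set.ofList int_set) (fun x => x) false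
  let vals : PySem.Set Int := PySem.Set.ofList s
  let starts := s.filter (fun v => !(decide ((v - 1) ∈ vals)))
  let ends := s.filter (fun v => !(decide ((v + 1) ∈ vals)))
  PySem.Str.join "," ((starts.zip ends).map bRenderPair)

-- ===== PRECONDITION & SPEC =====
-- Pre_ excludes only the empty list, on which A raises IndexError (int_list[0]).
def Pre_int_set_to_range_expr_py (int_set : List Int) : Prop := int_set ≠ []
instance (int_set : List Int) : Decidable (Pre_int_set_to_range_expr_py int_set) := by
  unfold Pre_int_set_to_range_expr_py; infer_instance

def pvWitness_int_set_to_range_expr_py : List Int := [1, 2, 3, 5, 9, 10]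

def Spec_int_set_to_range_expr_py (int_set : List Int) (out : String) : Prop := out = int_set_to_range_expr_py_alt int_set
instance (int_set : List Int) (out : String) : Decidable (Spec_int_set_to_range_expr_py int_set out) := by unfold Spec_int_set_to_range_expr_py; infer_instance

-- ===== CLAIM (what is proved, stated in full; the proofs are below) =====
def Claim_equal_int_set_to_range_expr_py : Prop := ∀ (int_set : List Int), Dom_int_set_to_range_expr_py int_set → Pre_int_set_to_range_expr_py int_set → Spec_int_set_to_range_expr_py int_set (int_set_to_range_expr_py int_set)

-- ===== LEMMAS AND PROOFS =====

-- Main correspondence: A's state machine on the remaining suffix xs from state (comps, st, en)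
-- equals comps followed by B's zip of membership-detected starts/ends, provided vals agrees
-- with en :: xs on every value ≥ en.
lemma key_inv (vals : List Int) (xs : List Int) (comps : List String) (st en : Int)
    (hsorted : xs.Pairwise (· < ·))
    (hgt : ∀ v ∈ xs, en < v)
    (hmem : ∀ w : Int, en ≤ w → (w ∈ vals ↔ w ∈ en :: xs)) :
    (xs.foldl aStep (comps, st, en)).1
      ++ [aAddStr (xs.foldl aStep (comps, st, en)).2.1 (xs.foldl aStep (comps, st, en)).2.2]
    = comps ++ (((st :: xs.filter (fun v => !(decide ((v - 1) ∈ vals)))).zip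
        ((en :: xs).filter (fun v => !(decide ((v + 1) ∈ vals))))).map bRenderPair) := by
  induction xs generalizing comps st en with
  | nil =>
    have h1 : ¬ ((en + 1 : Int) ∈ vals) := by
      intro h
      rw [hmem (en + 1) (by omega)] at h
      simp only [List.mem_cons, List.not_mem_nil, or_false] at h
      omega
    simp [h1, aAddStr, bRenderPair]
  | cons y ys ih =>
    have hy : en < y := hgt y (by simp)
    have hys : ∀ v ∈ ys, y < v := fun v hv => (List.pairwise_cons.mp hsorted).1 v hv
    have hsorted' := (List.pairwise_cons.mp hsorted).2
    by_cases hc : y = en + 1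
    · -- y continues the run
      have hstepA : aStep (comps, st, en) y = (comps, st, y) := by
        simp [aStep, hc]
      have hyin : ((y - 1 : Int) ∈ vals) := by
        rw [hmem (y - 1) (by omega)]
        simp only [List.mem_cons]
        left; omega
      have henddrop : ((en + 1 : Int) ∈ vals) := by
        rw [hmem (en + 1) (by omega)]
        simp only [List.mem_cons]
        right; left; omega
      have hmem' : ∀ w : Int, y ≤ w → (w ∈ vals ↔ w ∈ y :: ys) := by
        intro w hw
        rw [hmem w (by omega)]
        simp only [List.mem_cons]
        constructor
        · rintro (h | h)
          · omega
          · exact h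
        · intro h; exact Or.inr h
      have hsf : (y :: ys).filter (fun v => !(decide ((v - 1) ∈ vals)))
          = ys.filter (fun v => !(decide ((v - 1) ∈ vals))) := by
        simp [hyin]
      have hef : (en :: y :: ys).filter (fun v => !(decide ((v + 1) ∈ vals)))
          = (y :: ys).filter (fun v => !(decide ((v + 1) ∈ vals))) := by
        simp [List.filter_cons, henddrop]
      simp only [List.foldl_cons, hstepA]
      rw [hsf, hef]
      exact ih comps st y hsorted' hys hmem'
    · -- gap: y starts a new run
      have hstepA : aStep (comps, st, en) y = (comps ++ [aAddStr st en], y, y) := by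
        simp [aStep, hc]
      have hystart : ¬ ((y - 1 : Int) ∈ vals) := by
        intro h
        rw [hmem (y - 1) (by omega)] at h
        simp only [List.mem_cons] at h
        rcases h with h | h | h
        · omega
        · omega
        · have := hys _ h; omega
      have henkeep : ¬ ((en + 1 : Int) ∈ vals) := by
        intro h
        rw [hmem (en + 1) (by omega)] at h
        simp only [List.mem_cons] at h
        rcases h with h | h | h
        · omega
        · omega
        · have := hys _ h; omega
      have hmem' : ∀ w : Int, y ≤ w → (w ∈ vals ↔ w ∈ y :: ys) := by
        intro w hw
        rw [hmem w (by omega)]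
        simp only [List.mem_cons]
        constructor
        · rintro (h | h)
          · omega
          · exact h
        · intro h; exact Or.inr h
      have hsf : (y :: ys).filter (fun v => !(decide ((v - 1) ∈ vals)))
          = y :: ys.filter (fun v => !(decide ((v - 1) ∈ vals))) := by
        simp [hystart]
      have hef : (en :: y :: ys).filter (fun v => !(decide ((v + 1) ∈ vals)))
          = en :: (y :: ys).filter (fun v => !(decide ((v + 1) ∈ vals))) := by
        simp [List.filter_cons, henkeep]
      simp only [List.foldl_cons, hstepA]
      rw [hsf, hef, ih (comps ++ [aAddStr st en]) y y hsorted' hys hmem']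
      simp [bRenderPair, aAddStr, List.zip_cons_cons]

-- ===== VERDICT (by name: the statements are the Claim_ definitions above) =====
theorem int_set_to_range_expr_py_spec : Claim_equal_int_set_to_range_expr_py := by
  intro int_set _ hpre
  unfold Spec_int_set_to_range_expr_py int_set_to_range_expr_py int_set_to_range_expr_py_alt
  have hL : PySem.List.sorted (PySem.Set.ofList int_set) (fun x => x) false ≠ [] := by
    intro h
    rw [PySem.List.sorted_eq_nil_iff] at h
    match int_set, hpre with
    | x :: rest, _ =>
      have : x ∈ PySem.Set.ofList (x :: rest) := by
        rw [PySem.Set.mem_ofList]; simp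
      rw [h] at this
      simp at this
  have hpw : (PySem.List.sorted (PySem.Set.ofList int_set) (fun x => x) false).Pairwise (· < ·) :=
    PySem.List.sorted_ofList_pairwise_lt (xs := int_set)
  match hE : PySem.List.sorted (PySem.Set.ofList int_set) (fun x => x) false, hL with
  | x :: xs, _ =>
    rw [hE] at hpw
    have hxlt : ∀ v ∈ xs, x < v := fun v hv => (List.pairwise_cons.mp hpw).1 v hv
    have hmem : ∀ w : Int, x ≤ w →
        (w ∈ PySem.Set.ofList (x :: xs) ↔ w ∈ x :: xs) := by
      intro w _
      rw [PySem.Set.mem_ofList]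
    have hxstart : ¬ ((x - 1 : Int) ∈ PySem.Set.ofList (x :: xs)) := by
      intro h
      rw [PySem.Set.mem_ofList] at h
      simp only [List.mem_cons] at h
      rcases h with h | h
      · omega
      · have := hxlt _ h; omega
    simp only []
    rw [PySem.List.slice_from_one, List.tail_cons]
    rw [key_inv (PySem.Set.ofList (x :: xs)) xs [] x x
      (List.pairwise_cons.mp hpw).2 hxlt hmem]
    have hsf : (x :: xs).filter (fun v => !(decide ((v - 1) ∈ PySem.Set.ofList (x :: xs))))
        = x :: xs.filter (fun v => !(decide ((v - 1) ∈ PySem.Set.ofList (x :: xs)))) := by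
      have hx1 : ((x - 1 : Int)) ∉ xs := by
        intro h; have := hxlt _ h; omega
      have hxne : (x - 1 : Int) ≠ x := by omega
      simp only [List.filter_cons, PySem.Set.mem_ofList, List.mem_cons, hx1, or_false]
      simp [hxne]
    rw [hsf]
    simp
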